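-- pv_equiv track=rewrite | github.com/judydnguyen/open-unlearning-dev | scripts/collect_muse_baselines.py | discover_columns
-- ===== SOURCE A (Python) =====
-- CANONICAL_ORDER = [
--     "forget_knowmem_ROUGE",
--     "forget_verbmem_ROUGE",
--     "retain_knowmem_ROUGE",
--     "exact_memorization",
--     "extraction_strength",
--     "privleak",
--     "mia_loss",
--     "mia_gradnorm",
--     "mia_zlib",
--     "mia_min_k",
--     "mia_min_k_plus_plus",
--     "mia_reference",
-- ]
--
-- def discover_columns(entries: list[dict]) -> list[str]:
--     """Return every metric key seen in any entry, ordered canonically first."""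
--     seen: set[str] = set()
--     for r in entries:
--         for k, v in r.items():
--             if k in {"label", "source"}:
--                 continue
--             if isinstance(v, (int, float)):
--                 seen.add(k)
--     ordered = [c for c in CANONICAL_ORDER if c in seen]
--     extras = sorted(c for c in seen if c not in CANONICAL_ORDER)
--     return ordered + extras
-- ===== SOURCE B (Python) =====
-- CANONICAL_ORDER = [
--     "forget_knowmem_ROUGE",
--     "forget_verbmem_ROUGE",
--     "retain_knowmem_ROUGE",
--     "exact_memorization",
--     "extraction_strength",
--     "privleak",
--     "mia_loss",
--     "mia_gradnorm",
--     "mia_zlib",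
--     "mia_min_k",
--     "mia_min_k_plus_plus",
--     "mia_reference",
-- ]
--
-- _RANK = {name: i for i, name in enumerate(CANONICAL_ORDER)}
--
-- def discover_columns(entries: list[dict]) -> list[str]:
--     """Return every metric key seen in any entry, ordered canonically first."""
--     seen: set[str] = set()
--     for r in entries:
--         for k, v in r.items():
--             if k not in ("label", "source") and isinstance(v, (int, float)):
--                 seen.add(k)
--     n = len(CANONICAL_ORDER)
--     return sorted(seen, key=lambda c: (_RANK.get(c, n), c))
-- ===== Notes on version B (the rewrite author's own statement) =====
-- stated objective: alternative
-- what changed: A's two-comprehension ordering step (filter CANONICAL_ORDER by membership, sort the extras, concatenate) is replaced by a precomputed rank table and a single sorted(seen, key=(rank-or-n, name)) tuple-key sort that orders canonical keys by rank before extras alphabetically.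
import Mathlib
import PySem

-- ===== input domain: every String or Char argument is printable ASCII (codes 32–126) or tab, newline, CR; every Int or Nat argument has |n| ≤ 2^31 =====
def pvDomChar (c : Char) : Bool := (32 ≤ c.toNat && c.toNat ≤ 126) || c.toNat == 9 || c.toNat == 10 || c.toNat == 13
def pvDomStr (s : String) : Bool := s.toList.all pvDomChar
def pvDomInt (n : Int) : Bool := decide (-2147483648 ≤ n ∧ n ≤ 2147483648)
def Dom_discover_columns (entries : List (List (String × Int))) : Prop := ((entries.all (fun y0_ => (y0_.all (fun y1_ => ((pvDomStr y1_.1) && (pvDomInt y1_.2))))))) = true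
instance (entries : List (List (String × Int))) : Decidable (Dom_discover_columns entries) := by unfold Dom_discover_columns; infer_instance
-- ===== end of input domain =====

-- B replaces A's filter-canonical-list + sort-extras + concatenation by ONE sort with a
-- rank-table tuple key (canonical keys by table rank, extras after them alphabetically);
-- same collection loop, different ordering decomposition (objective: alternative).

-- ===== PORT A =====
def pvCanonical : List String :=
  ["forget_knowmem_ROUGE", "forget_verbmem_ROUGE", "retain_knowmem_ROUGE",
   "exact_memorization", "extraction_strength", "privleak", "mia_loss",
   "mia_gradnorm", "mia_zlib", "mia_min_k", "mia_min_k_plus_plus", "mia_reference"]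

-- isinstance(v, (int, float)) is identically true: v is an Int under the type convention.
def discover_columns (entries : List (List (String × Int))) : List String :=
  let seen : PySem.Set String :=
    entries.foldl (fun s r =>
      r.foldl (fun s kv =>
        if kv.1 == "label" || kv.1 == "source" then s
        else PySem.Set.add s kv.1) s) PySem.Set.empty
  let ordered := pvCanonical.filter (fun c => PySem.Set.contains seen c)
  let extras := PySem.List.sorted (seen.filter (fun c => !(pvCanonical.contains c))) (fun c => c) false
  ordered ++ extras

-- ===== PORT B =====
-- _RANK = {name: i for i, name in enumerate(CANONICAL_ORDER)}
def pvRank : PySem.Dict String Int :=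
  (pvCanonical.foldl (fun (p : PySem.Dict String Int × Int) name =>
      (p.1.insert name p.2, p.2 + 1)) (PySem.Dict.empty, 0)).1

-- isinstance(v, (int, float)) is identically true: v is an Int under the type convention.
def discover_columns_alt (entries : List (List (String × Int))) : List String :=
  let seen : PySem.Set String :=
    entries.foldl (fun s r =>
      r.foldl (fun s kv =>
        if !(kv.1 == "label" || kv.1 == "source") then PySem.Set.add s kv.1 else s) s)
      PySem.Set.empty
  -- sorted(seen, key=lambda c: (_RANK.get(c, n), c)); the tuple key is injective on seen,
  -- so the result does not depend on the set's iteration order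
  PySem.List.sorted seen
    (fun c => toLex ((pvRank.getD c (pvCanonical.length : Int), c) : Int × String)) false

-- ===== PRECONDITION & SPEC =====
def Spec_discover_columns (entries : List (List (String × Int))) (out : List String) : Prop := out = discover_columns_alt entries
instance (entries : List (List (String × Int))) (out : List String) : Decidable (Spec_discover_columns entries out) := by unfold Spec_discover_columns; infer_instance

-- ===== CLAIM (what is proved, stated in full; the proofs are below) =====
def Claim_equal_discover_columns : Prop := ∀ (entries : List (List (String × Int))), Dom_discover_columns entries → Spec_discover_columns entries (discover_columns entries)

-- ===== LEMMAS AND PROOFS =====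

-- B's key, named for the proofs below
def pvKey (c : String) : Lex (Int × String) :=
  toLex ((pvRank.getD c (pvCanonical.length : Int), c) : Int × String)

lemma pvRank_keys : pvRank.keys = pvCanonical := by decide

lemma pvRank_getD_of_not_canonical {b : String} (hb : b ∉ pvCanonical) :
    pvRank.getD b (pvCanonical.length : Int) = (pvCanonical.length : Int) := by
  apply PySem.Dict.getD_of_not_contains
  rw [← Bool.not_eq_true, PySem.Dict.contains_iff_mem_keys, pvRank_keys]
  exact hb

lemma pvRank_lt_of_canonical {a : String} (ha : a ∈ pvCanonical) :
    pvRank.getD a (pvCanonical.length : Int) < (pvCanonical.length : Int) := by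
  have h : ∀ a ∈ pvCanonical, pvRank.getD a (pvCanonical.length : Int) < (pvCanonical.length : Int) := by decide
  exact h a ha

lemma pvCanonical_pairwise_rank :
    pvCanonical.Pairwise (fun a b =>
      pvRank.getD a (pvCanonical.length : Int) < pvRank.getD b (pvCanonical.length : Int)) := by
  decide

lemma pvCanonical_nodup : pvCanonical.Nodup := by decide

-- the collection loop keeps the set Nodup
lemma pv_nodup_inner (r : List (String × Int)) (s : PySem.Set String) (h : s.Nodup) :
    (r.foldl (fun s kv =>
        if kv.1 == "label" || kv.1 == "source" then s
        else PySem.Set.add s kv.1) s).Nodup := by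
  induction r generalizing s with
  | nil => exact h
  | cons kv r ih =>
      simp only [List.foldl_cons]
      split
      · exact ih s h
      · exact ih _ (PySem.Set.nodup_add s kv.1 h)

lemma pv_nodup_seen (entries : List (List (String × Int))) :
    (entries.foldl (fun s r =>
        r.foldl (fun s kv =>
          if kv.1 == "label" || kv.1 == "source" then s
          else PySem.Set.add s kv.1) s) PySem.Set.empty).Nodup := by
  have main : ∀ (es : List (List (String × Int))) (s : PySem.Set String), s.Nodup →
      (es.foldl (fun s r =>
        r.foldl (fun s kv =>
          if kv.1 == "label" || kv.1 == "source" then s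
          else PySem.Set.add s kv.1) s) s).Nodup := by
    intro es
    induction es with
    | nil => intro s h; exact h
    | cons r es ih => intro s h; exact ih _ (pv_nodup_inner r s h)
  exact main entries [] List.nodup_nil

-- the heart: for ANY duplicate-free list of keys, A's ordered ++ extras IS B's single sort
lemma pv_main (seen : List String) (hnd : seen.Nodup) :
    pvCanonical.filter (fun c => PySem.Set.contains seen c) ++
      PySem.List.sorted (seen.filter (fun c => !(pvCanonical.contains c))) (fun c => c) false
    = PySem.List.sorted seen pvKey false := by
  set ordered := pvCanonical.filter (fun c => PySem.Set.contains seen c) with hord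
  set extras := PySem.List.sorted (seen.filter (fun c => !(pvCanonical.contains c))) (fun c => c) false with hext
  have hmem_ord : ∀ c, c ∈ ordered ↔ c ∈ pvCanonical ∧ c ∈ seen := by
    intro c
    simp [hord, List.mem_filter, PySem.Set.contains_eq_listContains]
  have hextras_perm : extras.Perm (seen.filter (fun c => !(pvCanonical.contains c))) :=
    PySem.List.sorted_perm _ _ _
  have hmem_ext : ∀ c, c ∈ extras ↔ c ∈ seen ∧ c ∉ pvCanonical := by
    intro c
    rw [hextras_perm.mem_iff]
    simp [List.mem_filter]
  -- permutation
  have hperm : (ordered ++ extras).Perm seen := by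
    have h1 : ordered.Perm (seen.filter (fun c => pvCanonical.contains c)) := by
      rw [List.perm_ext_iff_of_nodup (List.Nodup.filter _ pvCanonical_nodup) (List.Nodup.filter _ hnd)]
      intro a
      rw [hmem_ord a]
      simp [List.mem_filter, and_comm]
    have h2 : (ordered ++ extras).Perm
        (seen.filter (fun c => pvCanonical.contains c) ++
         seen.filter (fun c => !(pvCanonical.contains c))) :=
      h1.append hextras_perm
    exact h2.trans (List.filter_append_perm _ seen)
  -- strict pairwise order under B's key
  have hpair : (ordered ++ extras).Pairwise (fun a b => pvKey a < pvKey b) := by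
    rw [List.pairwise_append]
    refine ⟨?_, ?_, ?_⟩
    · -- within ordered: ranks strictly increase along pvCanonical
      have h := List.Pairwise.filter (R := fun a b =>
          pvRank.getD a (pvCanonical.length : Int) < pvRank.getD b (pvCanonical.length : Int))
          (fun c => PySem.Set.contains seen c) pvCanonical_pairwise_rank
      refine h.imp ?_
      intro a b hab
      exact Prod.Lex.toLex_lt_toLex.mpr (Or.inl hab)
    · -- within extras: equal rank component, strictly increasing strings
      have hle : extras.Pairwise (fun a b => a ≤ b) := PySem.List.sorted_pairwise _ _
      have hnd' : extras.Nodup := (hextras_perm.nodup_iff).mpr (List.Nodup.filter _ hnd)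
      have hlt : extras.Pairwise (fun a b : String => a < b) :=
        (hle.and hnd').imp (fun h => lt_of_le_of_ne h.1 h.2)
      refine hlt.imp_of_mem ?_
      intro a b ha hb hab
      have hra := pvRank_getD_of_not_canonical ((hmem_ext a).mp ha).2
      have hrb := pvRank_getD_of_not_canonical ((hmem_ext b).mp hb).2
      exact Prod.Lex.toLex_lt_toLex.mpr (Or.inr ⟨hra.trans hrb.symm, hab⟩)
    · -- across: every canonical rank is below the extras' default rank
      intro a ha b hb
      have hra := pvRank_lt_of_canonical ((hmem_ord a).mp ha).1
      have hrb := pvRank_getD_of_not_canonical ((hmem_ext b).mp hb).2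
      exact Prod.Lex.toLex_lt_toLex.mpr (Or.inl (by rw [hrb]; exact hra))
  exact (PySem.List.sorted_eq_of_perm_of_pairwise_lt seen (ordered ++ extras) pvKey hperm hpair).symm

-- B's collection loop is A's with the branch written positively
lemma pv_fold_eq (entries : List (List (String × Int))) :
    entries.foldl (fun s r =>
      r.foldl (fun s kv =>
        if !(kv.1 == "label" || kv.1 == "source") then PySem.Set.add s kv.1 else s) s)
      PySem.Set.empty
    = entries.foldl (fun s r =>
      r.foldl (fun s kv =>
        if kv.1 == "label" || kv.1 == "source" then s
        else PySem.Set.add s kv.1) s) PySem.Set.empty := by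
  congr 1
  funext s r
  congr 1
  funext s kv
  cases h : (kv.1 == "label" || kv.1 == "source") <;> simp

-- ===== VERDICT (by name: the statement is the Claim_ definition above) =====
theorem discover_columns_spec : Claim_equal_discover_columns := by
  intro entries _
  show discover_columns entries = discover_columns_alt entries
  unfold discover_columns discover_columns_alt
  rw [pv_fold_eq]
  exact pv_main _ (pv_nodup_seen entries)
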